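-- pv_equiv track=rewrite | github.com/hariseldon84/singlebrief-full | backend/app/orchestrator/query_parser.py | _detect_scope
-- ===== SOURCE A (Python) =====
-- def _detect_scope(query: str) -> str:
--     """Detect query scope"""
--     if any(word in query for word in ['team', 'everyone', 'all', 'group']):
--         return 'team'
--     elif any(word in query for word in ['project', 'sprint', 'release']):
--         return 'project'
--     elif any(word in query for word in ['company', 'organization', 'org']):
--         return 'organization'
--     else:
--         return 'personal'
-- ===== SOURCE B (Python) =====
-- # One left-to-right scan over the query's positions: collect the set of scopes
-- # whose keyword starts at some position, then resolve priority once at the end.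
-- KEYWORDS = [
--     ('team', 'team'), ('everyone', 'team'), ('all', 'team'), ('group', 'team'),
--     ('project', 'project'), ('sprint', 'project'), ('release', 'project'),
--     ('company', 'organization'), ('organization', 'organization'), ('org', 'organization'),
-- ]
--
-- def _detect_scope(query: str) -> str:
--     """Detect query scope"""
--     found = set()
--     for i in range(len(query)):
--         for word, scope in KEYWORDS:
--             if query.startswith(word, i):
--                 found.add(scope)
--     for scope in ('team', 'project', 'organization'):
--         if scope in found:
--             return scope
--     return 'personal'
-- ===== Notes on version B (the rewrite author's own statement) =====
-- stated objective: alternative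
-- what changed: Instead of running three staged any(word in query) substring searches with early returns, B makes a single positional scan over the query, collecting into a set every scope whose keyword starts at the current index, and resolves the team>project>organization>personal priority once at the end.
import Mathlib
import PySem

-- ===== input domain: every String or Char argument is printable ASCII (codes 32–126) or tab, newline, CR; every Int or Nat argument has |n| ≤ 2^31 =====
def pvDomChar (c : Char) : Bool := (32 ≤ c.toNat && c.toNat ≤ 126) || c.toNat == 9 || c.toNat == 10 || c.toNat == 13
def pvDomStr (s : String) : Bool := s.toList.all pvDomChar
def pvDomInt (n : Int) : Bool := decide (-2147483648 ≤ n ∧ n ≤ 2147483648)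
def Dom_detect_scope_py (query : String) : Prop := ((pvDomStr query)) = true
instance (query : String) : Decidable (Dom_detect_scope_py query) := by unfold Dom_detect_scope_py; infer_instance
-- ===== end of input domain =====

-- B replaces A's three staged substring searches by one positional scan that collects
-- the set of matched scopes and resolves the priority once at the end; objective: alternative.

-- ===== PORT A =====
def detect_scope_py (query : String) : String :=
  if (["team", "everyone", "all", "group"] : List String).any (fun word => PySem.Str.isIn word query) then
    "team"
  else if (["project", "sprint", "release"] : List String).any (fun word => PySem.Str.isIn word query) then
    "project"
  else if (["company", "organization", "org"] : List String).any (fun word => PySem.Str.isIn word query) then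
    "organization"
  else
    "personal"

-- ===== PORT B =====
def KEYWORDS : List (String × String) :=
  [("team", "team"), ("everyone", "team"), ("all", "team"), ("group", "team"),
   ("project", "project"), ("sprint", "project"), ("release", "project"),
   ("company", "organization"), ("organization", "organization"), ("org", "organization")]

-- 'query.startswith(word, i)' for 0 ≤ i: exact as prefix test on the i-th suffix
def bFound (query : String) : PySem.Set String :=
  (PySem.List.pyRange 0 (PySem.Str.len query) 1).foldl
    (fun f i => KEYWORDS.foldl
      (fun f p => if PySem.Chars.startswith (query.toList.drop i.toNat) p.1.toList then PySem.Set.add f p.2 else f) f)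
    PySem.Set.empty

-- the final 'for scope in (...): if scope in found: return scope' loop
def bPick (found : PySem.Set String) : List String → String
  | [] => "personal"
  | s :: rest => if PySem.Set.contains found s then s else bPick found rest

def detect_scope_py_alt (query : String) : String :=
  bPick (bFound query) ["team", "project", "organization"]

-- ===== PRECONDITION & SPEC =====
def Spec_detect_scope_py (query : String) (out : String) : Prop := out = detect_scope_py_alt query
instance (query : String) (out : String) : Decidable (Spec_detect_scope_py query out) := by unfold Spec_detect_scope_py; infer_instance

-- ===== CLAIM (what is proved, stated in full; the proofs are below) =====
def Claim_equal_detect_scope_py : Prop := ∀ (query : String), Dom_detect_scope_py query → Spec_detect_scope_py query (detect_scope_py query)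

-- ===== LEMMAS AND PROOFS =====

theorem mem_foldl_addif {α γ : Type} [BEq γ] [LawfulBEq γ]
    (l : List α) (c : α → Bool) (g : α → γ) (s : PySem.Set γ) (y : γ) :
    (y ∈ l.foldl (fun f p => if c p then PySem.Set.add f (g p) else f) s)
      ↔ y ∈ s ∨ ∃ p ∈ l, c p ∧ y = g p := by
  induction l generalizing s with
  | nil => simp
  | cons a t ih =>
    simp only [List.foldl_cons, ih, List.mem_cons]
    split
    · simp only [PySem.Set.mem_add]
      constructor
      · rintro (⟨h | h⟩ | ⟨p, hp, hc, hy⟩)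
        · exact Or.inl h
        · exact Or.inr ⟨a, Or.inl rfl, by assumption, h⟩
        · exact Or.inr ⟨p, Or.inr hp, hc, hy⟩
      · rintro (h | ⟨p, (rfl | hp), hc, hy⟩)
        · exact Or.inl (Or.inl h)
        · exact Or.inl (Or.inr hy)
        · exact Or.inr ⟨p, hp, hc, hy⟩
    · constructor
      · rintro (h | ⟨p, hp, hc, hy⟩)
        · exact Or.inl h
        · exact Or.inr ⟨p, Or.inr hp, hc, hy⟩
      · rintro (h | ⟨p, (rfl | hp), hc, hy⟩)
        · exact Or.inl h
        · exact absurd hc (by simp_all)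
        · exact Or.inr ⟨p, hp, hc, hy⟩

theorem mem_foldl_nested {α β γ : Type} [BEq γ] [LawfulBEq γ]
    (outer : List α) (inner : List β) (c : α → β → Bool) (g : β → γ) (s : PySem.Set γ) (y : γ) :
    (y ∈ outer.foldl (fun f i => inner.foldl (fun f p => if c i p then PySem.Set.add f (g p) else f) f) s)
      ↔ y ∈ s ∨ ∃ p ∈ inner, y = g p ∧ ∃ i ∈ outer, c i p := by
  induction outer generalizing s with
  | nil => simp
  | cons a t ih =>
    simp only [List.foldl_cons, ih, mem_foldl_addif, List.mem_cons]
    constructor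
    · rintro ((h | ⟨p, hp, hc, hy⟩) | ⟨p, hp, hy, i, hi, hc⟩)
      · exact Or.inl h
      · exact Or.inr ⟨p, hp, hy, a, Or.inl rfl, hc⟩
      · exact Or.inr ⟨p, hp, hy, i, Or.inr hi, hc⟩
    · rintro (h | ⟨p, hp, hy, i, (rfl | hi), hc⟩)
      · exact Or.inl (Or.inl h)
      · exact Or.inl (Or.inr ⟨p, hp, hc, hy⟩)
      · exact Or.inr ⟨p, hp, hy, i, hi, hc⟩

theorem exists_pos_iff_isIn (qs w : List Char) (hw : w ≠ []) :
    (∃ i ∈ PySem.List.pyRange 0 (qs.length : Int) 1, PySem.Chars.startswith (qs.drop i.toNat) w = true)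
      ↔ PySem.Chars.isIn w qs = true := by
  rw [← PySem.Chars.exists_prefix_drop_iff_isIn]
  constructor
  · rintro ⟨i, hi, h⟩
    exact ⟨i.toNat, (PySem.Chars.startswith_iff _ _).1 h⟩
  · rintro ⟨j, hj⟩
    by_cases hjn : j < qs.length
    · refine ⟨(j : Int), ?_, ?_⟩
      · rw [PySem.List.mem_pyRange_one]; omega
      · rw [PySem.Chars.startswith_iff]; simpa using hj
    · exfalso
      rw [List.drop_eq_nil_of_le (by omega)] at hj
      exact hw (List.prefix_nil.mp hj)

theorem mem_bFound (query : String) (y : String) :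
    y ∈ bFound query ↔ ∃ p ∈ KEYWORDS, y = p.2 ∧ PySem.Str.isIn p.1 query = true := by
  unfold bFound
  rw [mem_foldl_nested]
  simp only [PySem.Set.empty, List.not_mem_nil, false_or]
  constructor
  · rintro ⟨p, hp, hy, hex⟩
    refine ⟨p, hp, hy, ?_⟩
    rw [PySem.Str.isIn_eq] at *
    rw [← exists_pos_iff_isIn query.toList p.1.toList ?_]
    · simpa [PySem.Str.len_eq] using hex
    · fin_cases hp <;> simp
  · rintro ⟨p, hp, hy, hin⟩
    refine ⟨p, hp, hy, ?_⟩
    rw [PySem.Str.isIn_eq] at hin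
    rw [← exists_pos_iff_isIn query.toList p.1.toList ?_] at hin
    · simpa [PySem.Str.len_eq] using hin
    · fin_cases hp <;> simp

theorem contains_bFound_team (query : String) :
    PySem.Set.contains (bFound query) "team"
      = (["team", "everyone", "all", "group"] : List String).any (fun word => PySem.Str.isIn word query) := by
  rw [Bool.eq_iff_iff, PySem.Set.contains_iff, mem_bFound]
  simp [KEYWORDS]

theorem contains_bFound_project (query : String) :
    PySem.Set.contains (bFound query) "project"
      = (["project", "sprint", "release"] : List String).any (fun word => PySem.Str.isIn word query) := by
  rw [Bool.eq_iff_iff, PySem.Set.contains_iff, mem_bFound]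
  simp [KEYWORDS]

theorem contains_bFound_org (query : String) :
    PySem.Set.contains (bFound query) "organization"
      = (["company", "organization", "org"] : List String).any (fun word => PySem.Str.isIn word query) := by
  rw [Bool.eq_iff_iff, PySem.Set.contains_iff, mem_bFound]
  simp [KEYWORDS]

-- ===== VERDICT (by name: the statement is the Claim_ definition above) =====
theorem detect_scope_py_spec : Claim_equal_detect_scope_py := by
  intro query _
  unfold Spec_detect_scope_py detect_scope_py detect_scope_py_alt
  simp only [bPick, contains_bFound_team, contains_bFound_project, contains_bFound_org]
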